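-- pv_equiv track=rewrite | github.com/sbu-dsl/ocr-detection | alignment/lcs.py | unique_toks_idx
-- ===== SOURCE A (Python) =====
-- def unique_toks_idx(toks):
--     seen = set()
--     uniq = {}
--     for idx, tok in enumerate(toks):
--         if not tok.isalpha() or not tok.islower():
--             continue
--         if tok not in seen:
--             uniq[tok] = idx
--             seen.add(tok)
--         else:
--             if tok in uniq:
--                 del uniq[tok]
--     return uniq
-- ===== SOURCE B (Python) =====
-- def unique_toks_idx(toks):
--     # two-pass: count the filtered tokens, then pick those with count 1 at their index
--     counts = {}
--     for t in toks:
--         if t.isalpha() and t.islower():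
--             counts[t] = counts.get(t, 0) + 1
--     return {t: i for i, t in enumerate(toks) if counts.get(t, 0) == 1}
-- ===== Notes on version B (the rewrite author's own statement) =====
-- stated objective: simpler
-- what changed: Replaces the online set+dict add/delete bookkeeping with a two-pass count-then-select: first build a frequency table of the lowercase alphabetic tokens, then keep each token whose count is exactly 1 at its (unique) index.
import Mathlib
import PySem

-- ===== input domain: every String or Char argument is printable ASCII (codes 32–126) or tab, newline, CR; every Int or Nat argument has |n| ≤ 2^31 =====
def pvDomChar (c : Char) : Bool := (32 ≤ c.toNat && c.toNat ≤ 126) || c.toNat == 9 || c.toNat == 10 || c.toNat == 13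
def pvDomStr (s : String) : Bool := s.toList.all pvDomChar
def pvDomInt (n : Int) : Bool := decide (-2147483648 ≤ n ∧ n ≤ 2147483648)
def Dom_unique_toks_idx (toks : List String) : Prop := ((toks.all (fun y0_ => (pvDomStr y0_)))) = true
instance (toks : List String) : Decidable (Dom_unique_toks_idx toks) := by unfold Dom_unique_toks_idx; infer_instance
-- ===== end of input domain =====

-- B replaces A's online set+dict add/delete bookkeeping by a two-pass count-then-select (objective: simpler).

-- ===== PORT A =====
-- hand port of Python's str.islower() (exact on the ASCII domain: some cased character
-- exists and no character is uppercase); PySem has no whole-string islower.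
def pyIslower (s : String) : Bool :=
  s.toList.all (fun c => !PySem.Chars.isupper c) && s.toList.any PySem.Chars.islower

-- one iteration of A's loop body, state = (seen, uniq)
def uStep (st : PySem.Set String × PySem.Dict String Int) (p : Int × String) :
    PySem.Set String × PySem.Dict String Int :=
  if !PySem.Str.strIsalpha p.2 || !pyIslower p.2 then st
  else if !(PySem.Set.contains st.1 p.2) then (PySem.Set.add st.1 p.2, st.2.insert p.2 p.1)
  else if st.2.contains p.2 then (st.1, st.2.erase p.2)
  else st

def unique_toks_idx (toks : List String) : List (String × Int) :=
  ((PySem.List.enumerate toks).foldl uStep (PySem.Set.empty, PySem.Dict.empty)).2.items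

-- ===== PORT B =====
-- the filter 't.isalpha() and t.islower()' shared by Source B's two passes
def pyOk (t : String) : Bool := PySem.Str.strIsalpha t && pyIslower t

def unique_toks_idx_alt (toks : List String) : List (String × Int) :=
  let counts : PySem.Dict String Int :=
    toks.foldl (fun c t => if pyOk t then c.insert t (c.getD t 0 + 1) else c) PySem.Dict.empty
  -- the dict comprehension: its keys are pairwise distinct (each has count 1), so the
  -- built dict's item list is exactly the pairs appended in enumeration order
  (PySem.List.enumerate toks).foldl
    (fun acc p => if counts.getD p.2 0 == 1 then acc ++ [(p.2, p.1)] else acc) []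

-- ===== PRECONDITION & SPEC =====
def Spec_unique_toks_idx (toks : List String) (out : List (String × Int)) : Prop := out = unique_toks_idx_alt toks
instance (toks : List String) (out : List (String × Int)) : Decidable (Spec_unique_toks_idx toks out) := by unfold Spec_unique_toks_idx; infer_instance

-- ===== CLAIM (what is proved, stated in full; the proofs are below) =====
def Claim_equal_unique_toks_idx : Prop := ∀ (toks : List String), Dom_unique_toks_idx toks → Spec_unique_toks_idx toks (unique_toks_idx toks)

-- ===== LEMMAS AND PROOFS =====

-- number of filtered occurrences of token t among the (index, token) pairs l
def cntP (l : List (Int × String)) (t : String) : Nat :=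
  l.countP (fun p => pyOk p.2 && p.2 == t)

theorem cntP_cons (i : Int) (s t : String) (rest : List (Int × String)) :
    cntP ((i, s) :: rest) t = cntP rest t + (if pyOk s && s == t then 1 else 0) := by
  simp [cntP, List.countP_cons]

theorem nat_succ_beq_one (n : Nat) : (n + 1 == 1) = (n == 0) := by
  cases n <;> simp

theorem uStep_guard (st : PySem.Set String × PySem.Dict String Int) (p : Int × String) :
    uStep st p
      = if pyOk p.2 then
          (if !(PySem.Set.contains st.1 p.2) then (PySem.Set.add st.1 p.2, st.2.insert p.2 p.1)
           else if st.2.contains p.2 then (st.1, st.2.erase p.2) else st)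
        else st := by
  unfold uStep pyOk
  cases PySem.Str.strIsalpha p.2 <;> cases pyIslower p.2 <;> simp

-- on the tail, the selection predicate may count over the tail or over the whole list:
-- an already-seen head token cannot be selected from the tail either way
theorem restFilter_seen (i : Int) (t : String) (rest : List (Int × String))
    (seen : PySem.Set String) (hmem : t ∈ seen) :
    rest.filter (fun p' => pyOk p'.2 && !(PySem.Set.contains seen p'.2) && (cntP rest p'.2 == 1))
      = rest.filter (fun p' => pyOk p'.2 && !(PySem.Set.contains seen p'.2)
          && (cntP ((i, t) :: rest) p'.2 == 1)) := by
  refine List.filter_congr ?_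
  intro p' _
  by_cases hpt : p'.2 = t
  · simp [hpt, hmem]
  · have h3 : (t == p'.2) = false := by
      simp only [beq_eq_false_iff_ne]
      exact fun h => hpt h.symm
    rw [cntP_cons i t p'.2 rest]
    simp [h3]

-- A's loop, characterised: surviving old entries ++ fresh count-1 tokens at their index
theorem loopA (l : List (Int × String)) (seen : PySem.Set String) (uniq : PySem.Dict String Int)
    (hsub : ∀ k ∈ uniq.keys, k ∈ seen) :
    (l.foldl uStep (seen, uniq)).2.items
      = uniq.items.filter (fun q => cntP l q.1 == 0)
        ++ (l.filter (fun p => pyOk p.2 && !(PySem.Set.contains seen p.2)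
              && (cntP l p.2 == 1))).map (fun p => (p.2, p.1)) := by
  induction l generalizing seen uniq with
  | nil => simp [cntP]
  | cons p rest ih =>
    obtain ⟨i, t⟩ := p
    rw [List.foldl_cons, uStep_guard]
    by_cases hok : pyOk t = true
    · by_cases hmem : t ∈ seen
      · have hcs : PySem.Set.contains seen t = true := by
          simpa [PySem.Set.contains] using hmem
        rw [if_pos hok, if_neg (by simp [hmem])]
        by_cases hcon : uniq.contains t = true
        · -- second occurrence of a still-unique token: delete it
          rw [if_pos hcon]
          rw [ih seen (uniq.erase t) (by
            intro k hk
            apply hsub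
            simp only [PySem.Dict.keys, PySem.Dict.erase, List.mem_map, List.mem_filter] at hk ⊢
            obtain ⟨q, ⟨hq, _⟩, rfl⟩ := hk
            exact ⟨q, hq, rfl⟩)]
          rw [show (uniq.erase t).items = uniq.items.filter (fun q => !(q.1 == t)) from rfl]
          rw [List.filter_filter]
          simp only [List.filter_cons]
          rw [if_neg (by simp [hmem])]
          congr 1
          · refine List.filter_congr ?_
            intro q _
            rw [cntP_cons i t q.1 rest]
            simp only [hok, Bool.true_and]
            cases ht : (t == q.1)
            · have ht2 : (q.1 == t) = false := by
                simp only [beq_eq_false_iff_ne] at ht ⊢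
                exact fun h => ht h.symm
              simp [ht2]
            · have hqt : q.1 = t := (eq_of_beq ht).symm
              simp [hqt]
          · exact congrArg _ (restFilter_seen i t rest seen hmem)
        · -- repeated token already deleted (or never stored): no-op
          rw [if_neg hcon]
          rw [ih seen uniq hsub]
          simp only [List.filter_cons]
          rw [if_neg (by simp [hmem])]
          congr 1
          · refine List.filter_congr ?_
            intro q hq
            have hne : (t == q.1) = false := by
              simp only [beq_eq_false_iff_ne]
              intro h2
              exact hcon ((PySem.Dict.contains_iff_mem_keys uniq t).mpr
                (List.mem_map.mpr ⟨q, hq, h2.symm⟩))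
            rw [cntP_cons i t q.1 rest]
            simp [hne]
          · exact congrArg _ (restFilter_seen i t rest seen hmem)
      · -- first occurrence: record it
        have hcs : PySem.Set.contains seen t = false := by
          simp only [PySem.Set.contains, List.contains_eq_mem, decide_eq_false_iff_not]
          exact hmem
        have htk : t ∉ uniq.keys := fun h => hmem (hsub t h)
        have hcu : uniq.contains t = false := by
          cases hx : uniq.contains t
          · rfl
          · exact absurd ((PySem.Dict.contains_iff_mem_keys uniq t).mp hx) htk
        rw [if_pos hok, if_pos (by simp [hmem])]
        rw [ih (PySem.Set.add seen t) (uniq.insert t i) (by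
          intro k hk
          rw [PySem.Dict.mem_keys_insert] at hk
          rw [PySem.Set.mem_add]
          rcases hk with rfl | hk
          · exact Or.inr rfl
          · exact Or.inl (hsub k hk))]
        rw [PySem.Dict.items_insert_of_not_contains uniq i hcu, List.filter_append]
        simp only [List.filter_cons]
        have hself : cntP ((i, t) :: rest) t = cntP rest t + 1 := by
          rw [cntP_cons i t t rest]
          simp [hok]
        have e1 : uniq.items.filter (fun q => cntP rest q.1 == 0)
            = uniq.items.filter (fun q => cntP ((i, t) :: rest) q.1 == 0) := by
          refine List.filter_congr ?_
          intro q hq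
          have hne : (t == q.1) = false := by
            simp only [beq_eq_false_iff_ne]
            intro h
            exact hmem (h ▸ hsub q.1 (List.mem_map.mpr ⟨q, hq, rfl⟩))
          rw [cntP_cons i t q.1 rest]
          simp [hne]
        have e2 : rest.filter (fun p' => pyOk p'.2
              && !(PySem.Set.contains (PySem.Set.add seen t) p'.2) && (cntP rest p'.2 == 1))
            = rest.filter (fun p' => pyOk p'.2 && !(PySem.Set.contains seen p'.2)
              && (cntP ((i, t) :: rest) p'.2 == 1)) := by
          refine List.filter_congr ?_
          intro p' hp'
          by_cases hpt : p'.2 = t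
          · have h1 : PySem.Set.contains (PySem.Set.add seen t) p'.2 = true := by
              simp [PySem.Set.contains, hpt, PySem.Set.mem_add]
            by_cases hok2 : pyOk p'.2 = true
            · have hge : 0 < cntP rest p'.2 :=
                List.countP_pos_iff.mpr ⟨p', hp', by simp [hok2]⟩
              have hne1 : (cntP ((i, t) :: rest) p'.2 == 1) = false := by
                rw [cntP_cons i t p'.2 rest]
                have ht2 : (t == p'.2) = true := by simp [hpt]
                simp only [hok, ht2, Bool.and_self, if_true, beq_eq_false_iff_ne, Ne]
                omega
              simp only [hne1, Bool.and_false]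
              simp [hmem]
              intro _ _ hne
              exact absurd hpt hne
            · simp [hok2]
          · have h2 : PySem.Set.contains (PySem.Set.add seen t) p'.2
                = PySem.Set.contains seen p'.2 := by
              rw [PySem.Set.add_of_not_mem hmem]
              simp [PySem.Set.contains, hpt]
            have h3 : (t == p'.2) = false := by
              simp only [beq_eq_false_iff_ne]
              exact fun h => hpt h.symm
            rw [h2, cntP_cons i t p'.2 rest]
            simp [h3]
        rw [e1, e2]
        have hc1 : (pyOk t && !(PySem.Set.contains seen t)
            && (cntP ((i, t) :: rest) t == 1)) = (cntP rest t == 0) := by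
          rw [hself]
          simp [hok, hmem, nat_succ_beq_one]
        rw [hc1]
        cases hz : (cntP rest t == 0) <;> simp [List.append_assoc]
    · -- the token is filtered out
      have hok' : pyOk t = false := by simpa using hok
      rw [if_neg (by simp [hok'])]
      rw [ih seen uniq hsub]
      simp [cntP_cons, hok']

-- cntP over the enumeration is countP over the tokens
theorem cntP_enumerate (toks : List String) (s : Int) (t : String) :
    cntP (PySem.List.enumerate toks s) t = toks.countP (fun x => pyOk x && x == t) := by
  induction toks generalizing s with
  | nil => simp [cntP, PySem.List.enumerate]
  | cons a l ih =>
    rw [PySem.List.enumerate_cons]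
    simp only [cntP, List.countP_cons] at ih ⊢
    simp [ih]

-- the two selection predicates agree on every pair
theorem pred_eq (toks : List String) (p : Int × String) :
    (pyOk p.2 && !(PySem.Set.contains PySem.Set.empty p.2)
       && (cntP (PySem.List.enumerate toks) p.2 == 1))
    = ((((toks.filter pyOk).count p.2 : Int)) == 1) := by
  rw [cntP_enumerate]
  have hset : PySem.Set.contains PySem.Set.empty p.2 = false := rfl
  have hcount : (toks.filter pyOk).count p.2 = toks.countP (fun x => pyOk x && x == p.2) := by
    rw [List.count_eq_countP, List.countP_filter]
    refine List.countP_congr ?_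
    intro x _
    rw [Bool.and_comm]
  rw [hset, hcount]
  by_cases hok : pyOk p.2 = true
  · by_cases h1 : toks.countP (fun x => pyOk x && x == p.2) = 1
    · simp [hok, h1]
    · simp [hok, h1, Nat.cast_eq_one]
  · have hokf : pyOk p.2 = false := by simpa using hok
    have hz : toks.countP (fun x => pyOk x && x == p.2) = 0 := by
      refine List.countP_eq_zero.mpr ?_
      intro x _ hx
      rw [Bool.and_eq_true] at hx
      rw [eq_of_beq hx.2] at hx
      simp [hokf] at hx
    simp [hokf, hz]

-- ===== VERDICT (by name: the statement is the Claim_ definition above) =====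
theorem unique_toks_idx_spec : Claim_equal_unique_toks_idx := by
  intro toks _
  show unique_toks_idx toks = unique_toks_idx_alt toks
  unfold unique_toks_idx unique_toks_idx_alt
  rw [loopA _ _ _ (by intro k hk; simp [PySem.Dict.keys, PySem.Dict.empty] at hk)]
  have hget : ∀ s : String,
      (toks.foldl (fun c t => if pyOk t then c.insert t (c.getD t 0 + 1) else c)
        PySem.Dict.empty).getD s 0 = (((toks.filter pyOk).count s : Nat) : Int) := by
    intro s
    rw [PySem.List.foldl_if_eq_foldl_filter, PySem.Dict.getD_foldl_insert_add_one,
      PySem.Dict.getD_empty]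
    rw [List.count_eq_countP]
    simp
  simp only [hget]
  rw [PySem.List.foldl_append_if]
  rw [show (PySem.Dict.empty : PySem.Dict String Int).items = [] from rfl]
  simp only [List.filter_nil, List.nil_append]
  exact congrArg (List.map _) (List.filter_congr (fun p _ => pred_eq toks p))
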